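-- pv_equiv track=rewrite | github.com/MobbareKurtZ/aoc2023 | two/two.py | least_cube
-- ===== SOURCE A (Python) =====
-- def least_cube(game):
--     lgame = []
--     l = [0, 0, 0]
--     for r in game:
--         if int(r[0]) > int(l[0]) and int(r[0]) != 0:
--             l[0] = int(r[0])
--         if int(r[1]) > int(l[1]) and int(r[1]) != 0:
--             l[1] = int(r[1])
--         if int(r[2]) > int(l[2]) and int(r[2]) != 0:
--             l[2] = int(r[2])
--     lgame.append(l)
--     return lgame
-- ===== SOURCE B (Python) =====
-- def least_cube(game):
--     best = []
--     for i in range(3):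
--         col = [0]
--         for r in game:
--             col.append(int(r[i]))
--         col.sort()
--         best.append(col[-1])
--     return [best]
-- ===== Notes on version B (the rewrite author's own statement) =====
-- stated objective: alternative
-- what changed: Replaces A's single row-major pass with a running mutable triple (and a redundant != 0 test) by a sort-based selection: for each of the 3 columns B builds the column with a 0 sentinel, sorts it, and takes the last element as the floored maximum.
import Mathlib
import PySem

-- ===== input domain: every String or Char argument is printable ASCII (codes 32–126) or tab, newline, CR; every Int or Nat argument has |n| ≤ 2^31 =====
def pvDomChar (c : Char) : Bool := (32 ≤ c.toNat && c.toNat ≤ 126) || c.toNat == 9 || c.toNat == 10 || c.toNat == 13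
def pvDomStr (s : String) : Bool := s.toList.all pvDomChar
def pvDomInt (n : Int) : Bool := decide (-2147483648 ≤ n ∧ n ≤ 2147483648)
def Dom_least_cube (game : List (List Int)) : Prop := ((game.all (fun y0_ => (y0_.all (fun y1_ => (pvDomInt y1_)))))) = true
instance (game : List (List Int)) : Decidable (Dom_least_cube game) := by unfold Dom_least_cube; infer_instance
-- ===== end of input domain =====

-- B replaces A's row-major running-triple scan by a sort-based selection per column (different algorithm, not faster).

-- ===== PORT A =====
-- A: one pass over rows, running triple l, each component bumped when strictly larger and nonzero.
def least_cube (game : List (List Int)) : List (List Int) :=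
  let l := game.foldl (fun l r =>
    let r0 := (PySem.List.pyGet? r 0).getD 0   -- r[0]; Pre_ guarantees the index is in range
    let r1 := (PySem.List.pyGet? r 1).getD 0
    let r2 := (PySem.List.pyGet? r 2).getD 0
    let l0 := if r0 > l.1 ∧ r0 ≠ 0 then r0 else l.1
    let l1 := if r1 > l.2.1 ∧ r1 ≠ 0 then r1 else l.2.1
    let l2 := if r2 > l.2.2 ∧ r2 ≠ 0 then r2 else l.2.2
    (l0, l1, l2)) ((0 : Int), (0 : Int), (0 : Int))
  [[l.1, l.2.1, l.2.2]]

-- ===== PORT B =====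
-- B: for each column i in range(3), build [0] + column, sort it, take the last element.
def least_cube_alt (game : List (List Int)) : List (List Int) :=
  [(PySem.List.pyRange 0 3 1).map (fun i =>
    let col := (0 : Int) :: game.map (fun r => (PySem.List.pyGet? r i).getD 0)
    let s := PySem.List.sorted col (fun x => x) false
    (PySem.List.pyGet? s (-1)).getD 0)]

-- ===== PRECONDITION & SPEC =====
-- Pre_ excludes games with a row of fewer than 3 entries, where the Python A raises IndexError.
def Pre_least_cube (game : List (List Int)) : Prop := ∀ r ∈ game, 3 ≤ r.length
instance (game : List (List Int)) : Decidable (Pre_least_cube game) := by unfold Pre_least_cube; infer_instance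
def pvWitness_least_cube : List (List Int) := [[1, 2, 3], [4, 0, 1]]
def Spec_least_cube (game : List (List Int)) (out : List (List Int)) : Prop := out = least_cube_alt game
instance (game : List (List Int)) (out : List (List Int)) : Decidable (Spec_least_cube game out) := by unfold Spec_least_cube; infer_instance

-- ===== CLAIM (what is proved, stated in full; the proofs are below) =====
def Claim_equal_least_cube : Prop := ∀ (game : List (List Int)), Dom_least_cube game → Pre_least_cube game → Spec_least_cube game (least_cube game)

-- ===== LEMMAS AND PROOFS =====

-- A's running-triple fold computes the three column maxima, given nonnegative seeds.
theorem least_cube_fold (game : List (List Int)) :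
    ∀ a b c : Int, 0 ≤ a → 0 ≤ b → 0 ≤ c →
    game.foldl (fun l r =>
      let r0 := (PySem.List.pyGet? r 0).getD 0
      let r1 := (PySem.List.pyGet? r 1).getD 0
      let r2 := (PySem.List.pyGet? r 2).getD 0
      let l0 := if r0 > l.1 ∧ r0 ≠ 0 then r0 else l.1
      let l1 := if r1 > l.2.1 ∧ r1 ≠ 0 then r1 else l.2.1
      let l2 := if r2 > l.2.2 ∧ r2 ≠ 0 then r2 else l.2.2
      (l0, l1, l2)) (a, b, c)
    = ((game.map (fun r => (PySem.List.pyGet? r 0).getD 0)).foldl max a,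
       (game.map (fun r => (PySem.List.pyGet? r 1).getD 0)).foldl max b,
       (game.map (fun r => (PySem.List.pyGet? r 2).getD 0)).foldl max c) := by
  induction game with
  | nil => intro a b c _ _ _; rfl
  | cons r t ih =>
    intro a b c ha hb hc
    simp only [List.foldl_cons, List.map_cons]
    have step : ∀ x y : Int, 0 ≤ x → (if y > x ∧ y ≠ 0 then y else x) = max x y := by
      intro x y hx
      split_ifs with h
      · omega
      · omega
    rw [step a _ ha, step b _ hb, step c _ hc]
    exact ih _ _ _ (le_max_of_le_left ha) (le_max_of_le_left hb) (le_max_of_le_left hc)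

-- In a ≤-sorted list, every element is at most the last one.
theorem le_getLast_of_sorted (s : List Int) (hp : s.Pairwise (· ≤ ·)) :
    ∀ (h : s ≠ []), ∀ x ∈ s, x ≤ s.getLast h := by
  induction s with
  | nil => intro h; exact absurd rfl h
  | cons a t ih =>
    intro h x hx
    cases hx with
    | head =>
      cases t with
      | nil => simp
      | cons b t' =>
        rw [List.getLast_cons (by simp)]
        exact List.rel_of_pairwise_cons hp (List.getLast_mem _)
    | tail _ hx =>
      cases t with
      | nil => cases hx
      | cons b t' =>
        rw [List.getLast_cons (by simp)]
        exact ih hp.of_cons (by simp) x hx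

-- Folding max over a ≤-sorted list from a seed below its last element returns the last element.
theorem foldl_max_sorted (s : List Int) (hp : s.Pairwise (· ≤ ·)) :
    ∀ (h : s ≠ []) (a : Int), a ≤ s.getLast h → s.foldl max a = s.getLast h := by
  induction s with
  | nil => intro h; exact absurd rfl h
  | cons x t ih =>
    intro h a ha
    cases t with
    | nil => simpa using le_antisymm (by simpa using ha) (le_max_right a x)
    | cons b t' =>
      rw [List.getLast_cons (by simp)] at ha ⊢
      rw [List.foldl_cons]
      refine ih hp.of_cons (by simp) (max a x) (max_le ha ?_)
      exact List.rel_of_pairwise_cons hp (List.getLast_mem _)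

-- B's sort-then-take-last on [0] + column equals the floored column maximum.
theorem sorted_last_eq_foldl_max (xs : List Int) :
    (PySem.List.pyGet? (PySem.List.sorted ((0 : Int) :: xs) (fun x => x) false) (-1)).getD 0
      = xs.foldl max 0 := by
  set s := PySem.List.sorted ((0 : Int) :: xs) (fun x => x) false with hs
  have hperm : s.Perm ((0 : Int) :: xs) := PySem.List.sorted_perm _ _ _
  have hne : s ≠ [] := by
    intro h; have := hperm.length_eq; simp [h] at this
  have hp : s.Pairwise (· ≤ ·) := by
    have := PySem.List.sorted_pairwise (xs := (0 : Int) :: xs) (key := fun x => x)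
    simpa using this
  rw [PySem.List.pyGet?_neg_one, List.getLast?_eq_getLast_of_ne_nil hne, Option.getD_some]
  have h0 : (0 : Int) ∈ s := hperm.mem_iff.mpr (by simp)
  have hfold : s.foldl max 0 = s.getLast hne :=
    foldl_max_sorted s hp hne 0 (le_getLast_of_sorted s hp hne 0 h0)
  have hcomm : ∀ (a : Int) (l₁ l₂ : List Int), l₁.Perm l₂ → l₁.foldl max a = l₂.foldl max a := by
    intro a l₁ l₂ hpm
    exact hpm.foldl_eq a
  calc s.getLast hne = s.foldl max 0 := hfold.symm
    _ = ((0 : Int) :: xs).foldl max 0 := hcomm 0 s _ hperm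
    _ = xs.foldl max 0 := by simp

-- ===== VERDICT (by name: the statement is the Claim_ definition above) =====
theorem least_cube_spec : Claim_equal_least_cube := by
  intro game _ _
  show least_cube game = least_cube_alt game
  simp only [least_cube, least_cube_alt, least_cube_fold game 0 0 0 le_rfl le_rfl le_rfl,
    sorted_last_eq_foldl_max]
  rfl
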